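-- pv_equiv track=rewrite | github.com/ahmedmounirhse-oss/hse-ai-system | app.py | classify_hazard_backend
-- ===== SOURCE A (Python) =====
-- def classify_hazard_backend(text):
--     t = (text or "").lower()
--
--     # 🔴 CRITICAL PROCESS SAFETY (Priority 1)
--     if any(x in t for x in [
--         "gas leak","lpg","pressure release","explosion","blast","vapour cloud","fire"
--     ]):
--         return "Process Safety"
--
--     # 🔴 CHEMICAL
--     if any(x in t for x in [
--         "chemical","acid","toxic","fume","corrosion","spill"
--     ]):
--         return "Chemical Exposure"
--
--     # ⚙ MECHANICAL
--     if any(x in t for x in [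
--         "pump","compressor","equipment","machine","rotating","failure"
--     ]):
--         return "Mechanical Integrity"
--
--     # ⚡ ELECTRICAL
--     if any(x in t for x in [
--         "electric","shock","arc","panel","short circuit"
--     ]):
--         return "Electrical"
--
--     # 🪜 HEIGHT
--     if any(x in t for x in [
--         "fall","height","ladder","scaffold"
--     ]):
--         return "Work at Height"
--
--     # 🚧 CONFINED SPACE
--     if any(x in t for x in [
--         "confined","tank entry","vessel entry","oxygen"
--     ]):
--         return "Confined Space"
--
--     # 🏗 LIFTING
--     if any(x in t for x in [
--         "lifting","crane","rigging"
--     ]):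
--         return "Lifting Operations"
--
--     # 👷 BEHAVIORAL
--     if any(x in t for x in [
--         "no ppe","unsafe","violation","no helmet"
--     ]):
--         return "Behavioral Safety"
--
--     return "General"
-- ===== SOURCE B (Python) =====
-- # One flat keyword -> priority-rank dict; collect ranks of all matching keywords
-- # in a single pass, then return the label of the smallest (highest-priority) rank.
-- KW = {
--     "gas leak": 0, "lpg": 0, "pressure release": 0, "explosion": 0, "blast": 0, "vapour cloud": 0, "fire": 0,
--     "chemical": 1, "acid": 1, "toxic": 1, "fume": 1, "corrosion": 1, "spill": 1,
--     "pump": 2, "compressor": 2, "equipment": 2, "machine": 2, "rotating": 2, "failure": 2,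
--     "electric": 3, "shock": 3, "arc": 3, "panel": 3, "short circuit": 3,
--     "fall": 4, "height": 4, "ladder": 4, "scaffold": 4,
--     "confined": 5, "tank entry": 5, "vessel entry": 5, "oxygen": 5,
--     "lifting": 6, "crane": 6, "rigging": 6,
--     "no ppe": 7, "unsafe": 7, "violation": 7, "no helmet": 7,
-- }
--
-- LABELS = ["Process Safety", "Chemical Exposure", "Mechanical Integrity", "Electrical",
--           "Work at Height", "Confined Space", "Lifting Operations", "Behavioral Safety"]
--
-- def classify_hazard_backend(text):
--     t = (text or "").lower()
--     hits = [r for k, r in KW.items() if k in t]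
--     return LABELS[min(hits)] if hits else "General"
-- ===== Notes on version B (the rewrite author's own statement) =====
-- stated objective: alternative
-- what changed: Instead of eight ordered short-circuiting branches, B scans one flat keyword->rank map, collects the ranks of ALL matching keywords, and returns the label of the minimum rank (first match chain replaced by collect-then-min).
import Mathlib
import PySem

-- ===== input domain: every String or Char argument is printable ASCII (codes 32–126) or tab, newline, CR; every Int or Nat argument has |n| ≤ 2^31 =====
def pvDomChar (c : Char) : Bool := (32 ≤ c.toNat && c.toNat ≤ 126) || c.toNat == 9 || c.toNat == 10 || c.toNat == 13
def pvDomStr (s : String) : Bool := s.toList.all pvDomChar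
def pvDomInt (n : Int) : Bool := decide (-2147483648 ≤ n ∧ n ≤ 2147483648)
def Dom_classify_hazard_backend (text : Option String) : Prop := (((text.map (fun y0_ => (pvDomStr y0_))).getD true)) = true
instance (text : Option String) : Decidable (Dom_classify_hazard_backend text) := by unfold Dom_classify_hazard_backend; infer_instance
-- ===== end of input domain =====

-- B replaces A's eight ordered short-circuiting branches by a single pass over one flat
-- keyword->rank map that collects the ranks of ALL matching keywords and then returns the
-- label of the minimum rank (objective: alternative — collect-then-min instead of a
-- first-match branch chain).

-- ===== PORT A =====
def classify_hazard_backend (text : Option String) : String :=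
  let t := PySem.Str.lower (text.getD "")
  if ["gas leak","lpg","pressure release","explosion","blast","vapour cloud","fire"].any (fun x => PySem.Str.isIn x t) then "Process Safety"
  else if ["chemical","acid","toxic","fume","corrosion","spill"].any (fun x => PySem.Str.isIn x t) then "Chemical Exposure"
  else if ["pump","compressor","equipment","machine","rotating","failure"].any (fun x => PySem.Str.isIn x t) then "Mechanical Integrity"
  else if ["electric","shock","arc","panel","short circuit"].any (fun x => PySem.Str.isIn x t) then "Electrical"
  else if ["fall","height","ladder","scaffold"].any (fun x => PySem.Str.isIn x t) then "Work at Height"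
  else if ["confined","tank entry","vessel entry","oxygen"].any (fun x => PySem.Str.isIn x t) then "Confined Space"
  else if ["lifting","crane","rigging"].any (fun x => PySem.Str.isIn x t) then "Lifting Operations"
  else if ["no ppe","unsafe","violation","no helmet"].any (fun x => PySem.Str.isIn x t) then "Behavioral Safety"
  else "General"

-- ===== PORT B =====
-- flat keyword -> priority-rank dict (association list in insertion order, keys distinct)
def pvKW : List (String × Int) :=
  [("gas leak",0),("lpg",0),("pressure release",0),("explosion",0),("blast",0),("vapour cloud",0),("fire",0),
   ("chemical",1),("acid",1),("toxic",1),("fume",1),("corrosion",1),("spill",1),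
   ("pump",2),("compressor",2),("equipment",2),("machine",2),("rotating",2),("failure",2),
   ("electric",3),("shock",3),("arc",3),("panel",3),("short circuit",3),
   ("fall",4),("height",4),("ladder",4),("scaffold",4),
   ("confined",5),("tank entry",5),("vessel entry",5),("oxygen",5),
   ("lifting",6),("crane",6),("rigging",6),
   ("no ppe",7),("unsafe",7),("violation",7),("no helmet",7)]

def pvLabels : List String :=
  ["Process Safety", "Chemical Exposure", "Mechanical Integrity", "Electrical",
   "Work at Height", "Confined Space", "Lifting Operations", "Behavioral Safety"]

def classify_hazard_backend_alt (text : Option String) : String :=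
  let t := PySem.Str.lower (text.getD "")
  let hits := pvKW.filterMap (fun kr => if PySem.Str.isIn kr.1 t then some kr.2 else none)
  if hits = [] then "General"
  else
    match PySem.List.min? hits (fun y => y) with
    | some m => (PySem.List.pyGet? pvLabels m).getD "General"  -- min rank is always in [0,7], so in range; default never used
    | none => "General"

-- ===== PRECONDITION & SPEC =====
def Spec_classify_hazard_backend (text : Option String) (out : String) : Prop := out = classify_hazard_backend_alt text
instance (text : Option String) (out : String) : Decidable (Spec_classify_hazard_backend text out) := by unfold Spec_classify_hazard_backend; infer_instance

-- ===== CLAIM =====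
def Claim_equal_classify_hazard_backend : Prop := ∀ (text : Option String), Dom_classify_hazard_backend text → Spec_classify_hazard_backend text (classify_hazard_backend text)

-- ===== LEMMAS AND PROOFS =====

-- filterMap with a constant payload over one keyword group yields a replicate of its rank
theorem pv_fm_const (t : String) (i : Int) (kws : List String) :
    List.filterMap (fun kr => if PySem.Str.isIn kr.1 t then some kr.2 else none)
      (kws.map (fun k => (k, i)))
    = List.replicate (kws.countP (fun k => PySem.Str.isIn k t)) i := by
  induction kws with
  | nil => rfl
  | cons k ks ih =>
    simp only [List.map_cons, List.filterMap_cons, List.countP_cons, ih]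
    cases h : PySem.Str.isIn k t
    · simp
    · simp [List.replicate_succ]

theorem pv_foldl_min_of_le (i : Int) (l : List Int) (h : ∀ x ∈ l, i ≤ x) : l.foldl min i = i := by
  induction l with
  | nil => rfl
  | cons x xs ih =>
    have hx : i ≤ x := h x (by simp)
    simpa [min_eq_left hx] using ih (fun y hy => h y (by simp [hy]))

theorem pv_countP_zero_of_any_false {t : String} {kws : List String}
    (h : kws.any (fun x => PySem.Str.isIn x t) = false) :
    kws.countP (fun k => PySem.Str.isIn k t) = 0 := by
  refine List.countP_eq_zero.mpr (fun a ha => ?_)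
  have := (List.any_eq_false.mp h) a ha
  simpa using this

theorem pv_countP_pos_of_any_true {t : String} {kws : List String}
    (h : kws.any (fun x => PySem.Str.isIn x t) = true) :
    0 < kws.countP (fun k => PySem.Str.isIn k t) := by
  obtain ⟨a, ha, hpa⟩ := List.any_eq_true.mp h
  exact List.countP_pos_iff.mpr ⟨a, ha, by simpa using hpa⟩

theorem pv_minrep (n0 n1 n2 n3 n4 n5 n6 n7 : Nat) :
    (if (List.replicate n0 (0:Int) ++ (List.replicate n1 (1:Int) ++ (List.replicate n2 (2:Int) ++ (List.replicate n3 (3:Int) ++ (List.replicate n4 (4:Int) ++ (List.replicate n5 (5:Int) ++ (List.replicate n6 (6:Int) ++ List.replicate n7 (7:Int)))))))) = [] then "General" else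
      match PySem.List.min? (List.replicate n0 (0:Int) ++ (List.replicate n1 (1:Int) ++ (List.replicate n2 (2:Int) ++ (List.replicate n3 (3:Int) ++ (List.replicate n4 (4:Int) ++ (List.replicate n5 (5:Int) ++ (List.replicate n6 (6:Int) ++ List.replicate n7 (7:Int)))))))) (fun y => y) with
      | some m => (PySem.List.pyGet? pvLabels m).getD "General"
      | none => "General")
    = (if n0 ≠ 0 then "Process Safety" else (if n1 ≠ 0 then "Chemical Exposure" else (if n2 ≠ 0 then "Mechanical Integrity" else (if n3 ≠ 0 then "Electrical" else (if n4 ≠ 0 then "Work at Height" else (if n5 ≠ 0 then "Confined Space" else (if n6 ≠ 0 then "Lifting Operations" else (if n7 ≠ 0 then "Behavioral Safety" else "General")))))))) := by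
  cases n0 with
  | succ m =>
    rw [List.replicate_succ, List.cons_append, if_neg (List.cons_ne_nil _ _), PySem.List.min?_id_cons,
        pv_foldl_min_of_le (0:Int) _ (by intro x hx; simp only [List.mem_append, List.mem_replicate] at hx; omega),
        if_pos (Nat.succ_ne_zero m)]
    rfl
  | zero =>
    rw [List.replicate_zero, List.nil_append, if_neg (show ¬((0:Nat) ≠ 0) from fun h => h rfl)]
    cases n1 with
    | succ m =>
      rw [List.replicate_succ, List.cons_append, if_neg (List.cons_ne_nil _ _), PySem.List.min?_id_cons,
          pv_foldl_min_of_le (1:Int) _ (by intro x hx; simp only [List.mem_append, List.mem_replicate] at hx; omega),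
          if_pos (Nat.succ_ne_zero m)]
      rfl
    | zero =>
      rw [List.replicate_zero, List.nil_append, if_neg (show ¬((0:Nat) ≠ 0) from fun h => h rfl)]
      cases n2 with
      | succ m =>
        rw [List.replicate_succ, List.cons_append, if_neg (List.cons_ne_nil _ _), PySem.List.min?_id_cons,
            pv_foldl_min_of_le (2:Int) _ (by intro x hx; simp only [List.mem_append, List.mem_replicate] at hx; omega),
            if_pos (Nat.succ_ne_zero m)]
        rfl
      | zero =>
        rw [List.replicate_zero, List.nil_append, if_neg (show ¬((0:Nat) ≠ 0) from fun h => h rfl)]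
        cases n3 with
        | succ m =>
          rw [List.replicate_succ, List.cons_append, if_neg (List.cons_ne_nil _ _), PySem.List.min?_id_cons,
              pv_foldl_min_of_le (3:Int) _ (by intro x hx; simp only [List.mem_append, List.mem_replicate] at hx; omega),
              if_pos (Nat.succ_ne_zero m)]
          rfl
        | zero =>
          rw [List.replicate_zero, List.nil_append, if_neg (show ¬((0:Nat) ≠ 0) from fun h => h rfl)]
          cases n4 with
          | succ m =>
            rw [List.replicate_succ, List.cons_append, if_neg (List.cons_ne_nil _ _), PySem.List.min?_id_cons,
                pv_foldl_min_of_le (4:Int) _ (by intro x hx; simp only [List.mem_append, List.mem_replicate] at hx; omega),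
                if_pos (Nat.succ_ne_zero m)]
            rfl
          | zero =>
            rw [List.replicate_zero, List.nil_append, if_neg (show ¬((0:Nat) ≠ 0) from fun h => h rfl)]
            cases n5 with
            | succ m =>
              rw [List.replicate_succ, List.cons_append, if_neg (List.cons_ne_nil _ _), PySem.List.min?_id_cons,
                  pv_foldl_min_of_le (5:Int) _ (by intro x hx; simp only [List.mem_append, List.mem_replicate] at hx; omega),
                  if_pos (Nat.succ_ne_zero m)]
              rfl
            | zero =>
              rw [List.replicate_zero, List.nil_append, if_neg (show ¬((0:Nat) ≠ 0) from fun h => h rfl)]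
              cases n6 with
              | succ m =>
                rw [List.replicate_succ, List.cons_append, if_neg (List.cons_ne_nil _ _), PySem.List.min?_id_cons,
                    pv_foldl_min_of_le (6:Int) _ (by intro x hx; simp only [List.mem_append, List.mem_replicate] at hx; omega),
                    if_pos (Nat.succ_ne_zero m)]
                rfl
              | zero =>
                rw [List.replicate_zero, List.nil_append, if_neg (show ¬((0:Nat) ≠ 0) from fun h => h rfl)]
                cases n7 with
                | succ m =>
                  rw [List.replicate_succ, if_neg (List.cons_ne_nil _ _), PySem.List.min?_id_cons,
                      pv_foldl_min_of_le (7:Int) _ (by intro x hx; simp only [List.mem_replicate] at hx; omega),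
                      if_pos (Nat.succ_ne_zero m)]
                  rfl
                | zero =>
                  rw [List.replicate_zero, if_neg (show ¬((0:Nat) ≠ 0) from fun h => h rfl)]
                  rfl

-- ===== VERDICT =====
theorem classify_hazard_backend_spec : Claim_equal_classify_hazard_backend := by
  intro text _
  unfold Spec_classify_hazard_backend classify_hazard_backend classify_hazard_backend_alt
  dsimp only
  have hKW : pvKW = ((["gas leak","lpg","pressure release","explosion","blast","vapour cloud","fire"].map (fun k => (k, (0:Int)))) ++ ((["chemical","acid","toxic","fume","corrosion","spill"].map (fun k => (k, (1:Int)))) ++ ((["pump","compressor","equipment","machine","rotating","failure"].map (fun k => (k, (2:Int)))) ++ ((["electric","shock","arc","panel","short circuit"].map (fun k => (k, (3:Int)))) ++ ((["fall","height","ladder","scaffold"].map (fun k => (k, (4:Int)))) ++ ((["confined","tank entry","vessel entry","oxygen"].map (fun k => (k, (5:Int)))) ++ ((["lifting","crane","rigging"].map (fun k => (k, (6:Int)))) ++ (["no ppe","unsafe","violation","no helmet"].map (fun k => (k, (7:Int))))))))))) := by rfl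
  rw [hKW]
  simp only [List.filterMap_append, pv_fm_const, pv_minrep]
  cases h0 : List.any ["gas leak","lpg","pressure release","explosion","blast","vapour cloud","fire"] (fun x => PySem.Str.isIn x (PySem.Str.lower (text.getD ""))) with
  | true =>
    rw [if_pos (rfl : (true:Bool) = true), if_pos (show List.countP (fun k => PySem.Str.isIn k (PySem.Str.lower (text.getD ""))) ["gas leak","lpg","pressure release","explosion","blast","vapour cloud","fire"] ≠ 0 from by have := pv_countP_pos_of_any_true h0; omega)]
  | false =>
    rw [if_neg (show ¬((false:Bool) = true) from by simp), pv_countP_zero_of_any_false h0, if_neg (show ¬((0:Nat) ≠ 0) from fun h => h rfl)]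
    cases h1 : List.any ["chemical","acid","toxic","fume","corrosion","spill"] (fun x => PySem.Str.isIn x (PySem.Str.lower (text.getD ""))) with
    | true =>
      rw [if_pos (rfl : (true:Bool) = true), if_pos (show List.countP (fun k => PySem.Str.isIn k (PySem.Str.lower (text.getD ""))) ["chemical","acid","toxic","fume","corrosion","spill"] ≠ 0 from by have := pv_countP_pos_of_any_true h1; omega)]
    | false =>
      rw [if_neg (show ¬((false:Bool) = true) from by simp), pv_countP_zero_of_any_false h1, if_neg (show ¬((0:Nat) ≠ 0) from fun h => h rfl)]
      cases h2 : List.any ["pump","compressor","equipment","machine","rotating","failure"] (fun x => PySem.Str.isIn x (PySem.Str.lower (text.getD ""))) with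
      | true =>
        rw [if_pos (rfl : (true:Bool) = true), if_pos (show List.countP (fun k => PySem.Str.isIn k (PySem.Str.lower (text.getD ""))) ["pump","compressor","equipment","machine","rotating","failure"] ≠ 0 from by have := pv_countP_pos_of_any_true h2; omega)]
      | false =>
        rw [if_neg (show ¬((false:Bool) = true) from by simp), pv_countP_zero_of_any_false h2, if_neg (show ¬((0:Nat) ≠ 0) from fun h => h rfl)]
        cases h3 : List.any ["electric","shock","arc","panel","short circuit"] (fun x => PySem.Str.isIn x (PySem.Str.lower (text.getD ""))) with
        | true =>
          rw [if_pos (rfl : (true:Bool) = true), if_pos (show List.countP (fun k => PySem.Str.isIn k (PySem.Str.lower (text.getD ""))) ["electric","shock","arc","panel","short circuit"] ≠ 0 from by have := pv_countP_pos_of_any_true h3; omega)]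
        | false =>
          rw [if_neg (show ¬((false:Bool) = true) from by simp), pv_countP_zero_of_any_false h3, if_neg (show ¬((0:Nat) ≠ 0) from fun h => h rfl)]
          cases h4 : List.any ["fall","height","ladder","scaffold"] (fun x => PySem.Str.isIn x (PySem.Str.lower (text.getD ""))) with
          | true =>
            rw [if_pos (rfl : (true:Bool) = true), if_pos (show List.countP (fun k => PySem.Str.isIn k (PySem.Str.lower (text.getD ""))) ["fall","height","ladder","scaffold"] ≠ 0 from by have := pv_countP_pos_of_any_true h4; omega)]
          | false =>
            rw [if_neg (show ¬((false:Bool) = true) from by simp), pv_countP_zero_of_any_false h4, if_neg (show ¬((0:Nat) ≠ 0) from fun h => h rfl)]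
            cases h5 : List.any ["confined","tank entry","vessel entry","oxygen"] (fun x => PySem.Str.isIn x (PySem.Str.lower (text.getD ""))) with
            | true =>
              rw [if_pos (rfl : (true:Bool) = true), if_pos (show List.countP (fun k => PySem.Str.isIn k (PySem.Str.lower (text.getD ""))) ["confined","tank entry","vessel entry","oxygen"] ≠ 0 from by have := pv_countP_pos_of_any_true h5; omega)]
            | false =>
              rw [if_neg (show ¬((false:Bool) = true) from by simp), pv_countP_zero_of_any_false h5, if_neg (show ¬((0:Nat) ≠ 0) from fun h => h rfl)]
              cases h6 : List.any ["lifting","crane","rigging"] (fun x => PySem.Str.isIn x (PySem.Str.lower (text.getD ""))) with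
              | true =>
                rw [if_pos (rfl : (true:Bool) = true), if_pos (show List.countP (fun k => PySem.Str.isIn k (PySem.Str.lower (text.getD ""))) ["lifting","crane","rigging"] ≠ 0 from by have := pv_countP_pos_of_any_true h6; omega)]
              | false =>
                rw [if_neg (show ¬((false:Bool) = true) from by simp), pv_countP_zero_of_any_false h6, if_neg (show ¬((0:Nat) ≠ 0) from fun h => h rfl)]
                cases h7 : List.any ["no ppe","unsafe","violation","no helmet"] (fun x => PySem.Str.isIn x (PySem.Str.lower (text.getD ""))) with
                | true =>
                  rw [if_pos (rfl : (true:Bool) = true), if_pos (show List.countP (fun k => PySem.Str.isIn k (PySem.Str.lower (text.getD ""))) ["no ppe","unsafe","violation","no helmet"] ≠ 0 from by have := pv_countP_pos_of_any_true h7; omega)]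
                | false =>
                  rw [if_neg (show ¬((false:Bool) = true) from by simp), pv_countP_zero_of_any_false h7, if_neg (show ¬((0:Nat) ≠ 0) from fun h => h rfl)]
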